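-- pv_equiv track=rewrite | github.com/raaperrotta/jotto | jotto.py | jotto_score
-- ===== SOURCE A (Python) =====
-- def jotto_score(solution, guess):
--     solution = solution.lower()
--     guess = guess.lower()
--     # number letters right and in right place
--     num_right_place = 0
--     for s, g in zip(solution, guess):
--         if s == g:
--             num_right_place += 1
--     # number letters right (including in wrong place)
--     num_right_letter = 0
--     for letter in set(solution):
--         num_right_letter += min(
--             solution.count(letter),
--             guess.count(letter))
--     return num_right_letter, num_right_place
-- ===== SOURCE B (Python) =====
-- def jotto_score(solution, guess):
--     solution = solution.lower()
--     guess = guess.lower()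
--     num_right_place = sum(1 for s, g in zip(solution, guess) if s == g)
--     a = sorted(solution)
--     b = sorted(guess)
--     shared = 0
--     i = j = 0
--     while i < len(a) and j < len(b):
--         if a[i] == b[j]:
--             shared += 1
--             i += 1
--             j += 1
--         elif a[i] < b[j]:
--             i += 1
--         else:
--             j += 1
--     return shared, num_right_place
-- ===== Notes on version B (the rewrite author's own statement) =====
-- stated objective: alternative
-- what changed: The shared-letter count no longer scans both strings with .count for every distinct letter of the solution; instead both lowered strings are sorted once and a single two-pointer merge over the sorted sequences counts the multiset intersection.
import Mathlib
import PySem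

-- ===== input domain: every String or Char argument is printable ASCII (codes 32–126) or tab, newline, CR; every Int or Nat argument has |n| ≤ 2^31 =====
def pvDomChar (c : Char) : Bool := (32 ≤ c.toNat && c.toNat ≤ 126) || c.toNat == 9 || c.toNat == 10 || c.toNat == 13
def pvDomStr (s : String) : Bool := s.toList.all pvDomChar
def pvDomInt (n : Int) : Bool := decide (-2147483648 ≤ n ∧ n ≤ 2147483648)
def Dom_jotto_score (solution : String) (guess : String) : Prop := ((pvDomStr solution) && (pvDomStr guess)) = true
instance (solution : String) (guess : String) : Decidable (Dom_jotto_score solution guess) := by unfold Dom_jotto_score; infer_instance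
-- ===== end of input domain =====

-- B replaces A's per-distinct-letter .count scans by sorting both lowered strings once and
-- counting shared letters with a single two-pointer merge (objective: alternative algorithm).

-- ===== PORT A =====
def jotto_score (solution : String) (guess : String) : Int × Int :=
  let sol := PySem.Chars.lower solution.toList
  let gu := PySem.Chars.lower guess.toList
  -- number letters right and in right place
  let num_right_place : Int :=
    (sol.zip gu).foldl (fun acc p => if p.1 == p.2 then acc + 1 else acc) 0
  -- number letters right (including in wrong place): loop over set(solution);
  -- the sum does not depend on Python's set iteration order
  let num_right_letter : Int :=
    (PySem.Set.ofList sol).foldl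
      (fun acc letter =>
        acc + min ((PySem.Chars.count sol [letter] : Int)) ((PySem.Chars.count gu [letter] : Int))) 0
  (num_right_letter, num_right_place)

-- ===== PORT B =====
-- the two-pointer while loop of Source B over the two sorted lists
def pvMergeShared : List Char → List Char → Int
  | [], _ => 0
  | _ :: _, [] => 0
  | x :: xs, y :: ys =>
    if x = y then 1 + pvMergeShared xs ys
    else if x < y then pvMergeShared xs (y :: ys)
    else pvMergeShared (x :: xs) ys
termination_by a b => a.length + b.length

def jotto_score_alt (solution : String) (guess : String) : Int × Int :=
  let sol := PySem.Chars.lower solution.toList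
  let gu := PySem.Chars.lower guess.toList
  let num_right_place : Int := ((sol.zip gu).countP (fun p => p.1 == p.2) : Int)
  let a := PySem.List.sorted sol (fun c => c)
  let b := PySem.List.sorted gu (fun c => c)
  (pvMergeShared a b, num_right_place)

-- ===== PRECONDITION & SPEC =====
def Spec_jotto_score (solution : String) (guess : String) (out : Int × Int) : Prop := out = jotto_score_alt solution guess
instance (solution : String) (guess : String) (out : Int × Int) : Decidable (Spec_jotto_score solution guess out) := by unfold Spec_jotto_score; infer_instance

-- ===== CLAIM (what is proved, stated in full; the proofs are below) =====
def Claim_equal_jotto_score : Prop := ∀ (solution : String) (guess : String), Dom_jotto_score solution guess → Spec_jotto_score solution guess (jotto_score solution guess)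

-- ===== LEMMAS AND PROOFS =====

-- Python's str.count with a single-character needle is the element count.
theorem pvCountGo_singleton (c : Char) (l : List Char) : ∀ (fuel : Nat) (acc : Nat),
    l.length ≤ fuel → PySem.Chars.count.go [c] fuel l acc = acc + l.count c := by
  induction l with
  | nil => intro fuel acc _; cases fuel <;> simp [PySem.Chars.count.go]
  | cons h t ih =>
    intro fuel acc hlen
    cases fuel with
    | zero => simp at hlen
    | succ n =>
      simp only [PySem.Chars.count.go]
      by_cases hc : c = h
      · subst hc
        have hpre : ([c].isPrefixOf (c :: t)) = true := by simp [List.isPrefixOf]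
        rw [hpre, if_pos rfl]
        have hdrop : List.drop [c].length (c :: t) = t := by simp
        rw [hdrop, ih n (acc + 1) (by simpa using Nat.le_of_succ_le_succ hlen)]
        simp
        omega
      · have hpre : ([c].isPrefixOf (h :: t)) = false := by
          simp [List.isPrefixOf, hc]
        rw [hpre]
        simp only [Bool.false_eq_true, if_false]
        rw [ih n acc (by simpa using Nat.le_of_succ_le_succ hlen)]
        simp [Ne.symm hc]

theorem pvCount_singleton (s : List Char) (c : Char) :
    PySem.Chars.count s [c] = s.count c := by
  rw [show PySem.Chars.count s [c] = PySem.Chars.count.go [c] s.length s 0 from rfl]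
  rw [pvCountGo_singleton c s s.length 0 le_rfl, Nat.zero_add]

-- multiset-intersection facts the merge proof steps on
theorem pvInter_cons_cons (a : Char) (s t : Multiset Char) :
    (a ::ₘ s) ∩ (a ::ₘ t) = a ::ₘ (s ∩ t) := by
  ext c; simp [Multiset.count_inter, Multiset.count_cons]

theorem pvInter_cons_left (x : Char) (s t : Multiset Char) (h : x ∉ t) :
    (x ::ₘ s) ∩ t = s ∩ t := by
  have hx : Multiset.count x t = 0 := Multiset.count_eq_zero.mpr h
  ext c
  by_cases hc : c = x
  · subst hc; simp [Multiset.count_inter, hx]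
  · simp [Multiset.count_inter, hc]

-- the two-pointer merge on sorted lists computes the multiset-intersection size
theorem pvMergeShared_aux (n : Nat) : ∀ (a b : List Char), a.length + b.length ≤ n →
    a.Pairwise (· ≤ ·) → b.Pairwise (· ≤ ·) →
    pvMergeShared a b = (((a : Multiset Char) ∩ (b : Multiset Char)).card : Int) := by
  induction n with
  | zero =>
    intro a b hlen _ _
    have ha : a = [] := List.eq_nil_of_length_eq_zero (by omega)
    subst ha; simp [pvMergeShared]
  | succ n ih =>
    intro a b hlen ha hb
    match a, b with
    | [], b => simp [pvMergeShared]
    | x :: xs, [] => simp [pvMergeShared]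
    | x :: xs, y :: ys =>
      rw [pvMergeShared]
      by_cases hxy : x = y
      · subst hxy
        rw [if_pos rfl]
        rw [ih xs ys (by simp at hlen ⊢; omega) (List.Pairwise.of_cons ha) (List.Pairwise.of_cons hb)]
        have : ((x :: xs : List Char) : Multiset Char) ∩ ((x :: ys : List Char) : Multiset Char)
            = x ::ₘ (((xs : List Char) : Multiset Char) ∩ ((ys : List Char) : Multiset Char)) := by
          exact pvInter_cons_cons x (xs : Multiset Char) (ys : Multiset Char)
        rw [this, Multiset.card_cons]
        push_cast
        omega
      · rw [if_neg hxy]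
        by_cases hlt : x < y
        · rw [if_pos hlt]
          rw [ih xs (y :: ys) (by simp at hlen ⊢; omega) (List.Pairwise.of_cons ha) hb]
          have hnm : x ∉ ((y :: ys : List Char) : Multiset Char) := by
            simp only [Multiset.mem_coe, List.mem_cons]
            rintro (rfl | hmem)
            · exact lt_irrefl x hlt
            · have := (List.pairwise_cons.mp hb).1 x hmem
              exact absurd hlt (not_lt.mpr this)
          rw [show ((x :: xs : List Char) : Multiset Char) = x ::ₘ (xs : Multiset Char) by simp]
          rw [pvInter_cons_left x _ _ hnm]
        · rw [if_neg hlt]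
          have hnm : y ∉ ((x :: xs : List Char) : Multiset Char) := by
            simp only [Multiset.mem_coe, List.mem_cons]
            rintro (rfl | hmem)
            · exact hxy rfl
            · have := (List.pairwise_cons.mp ha).1 y hmem
              have hyx : y < x := lt_of_le_of_ne (not_lt.mp hlt) (Ne.symm hxy)
              exact absurd this (not_le.mpr hyx)
          have hdrop : ((x :: xs : List Char) : Multiset Char) ∩ ((y :: ys : List Char) : Multiset Char)
              = ((x :: xs : List Char) : Multiset Char) ∩ ((ys : List Char) : Multiset Char) := by
            rw [show ((y :: ys : List Char) : Multiset Char) = y ::ₘ (ys : Multiset Char) by simp]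
            rw [Multiset.inter_comm, pvInter_cons_left y _ _ hnm, Multiset.inter_comm]
          rw [ih (x :: xs) ys (by simp at hlen ⊢; omega) ha (List.Pairwise.of_cons hb), hdrop]

-- A's sum over set(solution) of min counts is the multiset-intersection size (Nat core)
theorem pvSum_min_card (sol gu : List Char) :
    ∑ c ∈ sol.toFinset, min (sol.count c) (gu.count c)
      = (((sol : Multiset Char) ∩ (gu : Multiset Char)).card) := by
  rw [← Multiset.toFinset_sum_count_eq (((sol : Multiset Char) ∩ (gu : Multiset Char)))]
  have hsub : (((sol : Multiset Char) ∩ (gu : Multiset Char))).toFinset ⊆ sol.toFinset := by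
    intro c hc
    simp only [Multiset.mem_toFinset, Multiset.mem_inter, Multiset.mem_coe] at hc
    simpa [List.mem_toFinset] using hc.1
  rw [Finset.sum_subset hsub]
  · apply Finset.sum_congr rfl
    intro c _
    simp

  · intro c _ hc
    simp only [Multiset.mem_toFinset, Multiset.mem_inter, Multiset.mem_coe, not_and] at hc
    rw [Multiset.count_eq_zero]
    simpa [Multiset.mem_inter] using hc

-- the Int-level foldl of A equals the multiset-intersection size
theorem pvSum_min_eq (sol gu : List Char) :
    (PySem.Set.ofList sol).foldl
      (fun acc letter =>
        acc + min ((PySem.Chars.count sol [letter] : Int)) ((PySem.Chars.count gu [letter] : Int))) 0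
    = (((sol : Multiset Char) ∩ (gu : Multiset Char)).card : Int) := by
  rw [PySem.List.foldl_add]
  rw [zero_add]
  have hnodup : (PySem.Set.ofList sol).Nodup := PySem.Set.nodup_ofList sol
  rw [← List.sum_toFinset _ hnodup]
  have hfs : (PySem.Set.ofList sol).toFinset = sol.toFinset := by
    ext c; simp [PySem.Set.mem_ofList]
  rw [hfs]
  calc ∑ c ∈ sol.toFinset, min ((PySem.Chars.count sol [c] : Int)) ((PySem.Chars.count gu [c] : Int))
      = ∑ c ∈ sol.toFinset, ((min (sol.count c) (gu.count c) : Nat) : Int) := by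
        apply Finset.sum_congr rfl
        intro c _
        rw [pvCount_singleton, pvCount_singleton, Nat.cast_min]
    _ = ((∑ c ∈ sol.toFinset, min (sol.count c) (gu.count c) : Nat) : Int) := by
        rw [Nat.cast_sum]
    _ = _ := by rw [pvSum_min_card]

-- ===== VERDICT (by name: the statement is the Claim_ definition above) =====
theorem jotto_score_spec : Claim_equal_jotto_score := by
  intro solution guess _
  unfold Spec_jotto_score jotto_score jotto_score_alt
  simp only []
  apply Prod.ext
  · -- shared-letter component
    show (PySem.Set.ofList _).foldl _ 0 = pvMergeShared _ _
    rw [pvSum_min_eq]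
    have hA : (PySem.List.sorted (PySem.Chars.lower solution.toList) (fun c : Char => c)).Pairwise (· ≤ ·) :=
      PySem.List.sorted_pairwise (PySem.Chars.lower solution.toList) (fun c : Char => c)
    have hB : (PySem.List.sorted (PySem.Chars.lower guess.toList) (fun c : Char => c)).Pairwise (· ≤ ·) :=
      PySem.List.sorted_pairwise (PySem.Chars.lower guess.toList) (fun c : Char => c)
    rw [pvMergeShared_aux
        ((PySem.List.sorted (PySem.Chars.lower solution.toList) (fun c : Char => c)).length
          + (PySem.List.sorted (PySem.Chars.lower guess.toList) (fun c : Char => c)).length)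
        _ _ le_rfl hA hB]
    have e1 : ((PySem.List.sorted (PySem.Chars.lower solution.toList) (fun c : Char => c) : List Char) : Multiset Char)
        = ((PySem.Chars.lower solution.toList : List Char) : Multiset Char) :=
      Multiset.coe_eq_coe.mpr (PySem.List.sorted_perm (PySem.Chars.lower solution.toList) (fun c : Char => c) false)
    have e2 : ((PySem.List.sorted (PySem.Chars.lower guess.toList) (fun c : Char => c) : List Char) : Multiset Char)
        = ((PySem.Chars.lower guess.toList : List Char) : Multiset Char) :=
      Multiset.coe_eq_coe.mpr (PySem.List.sorted_perm (PySem.Chars.lower guess.toList) (fun c : Char => c) false)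
    rw [e1, e2]
  · -- right-place component
    show List.foldl _ 0 _ = _
    rw [PySem.List.foldl_if_add_one, zero_add]
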